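-- pv_equiv track=rewrite | github.com/Anfany/Codility-Lessons-By-Python3 | L17_Dynamic programming/17.2_MinAbsSum.py | solution
-- ===== SOURCE A (Python) =====
-- def solution(A):
--     """
--     针对数组A，寻找一个由1和-1组成的数组，使得两个数组对应元素乘积和的绝对值最小
--     时间复杂度：:O(N * max(abs(A))**2)
--     :param A: 数组A
--     :return: 返回最小的绝对值
--     """
--     if len(A) == 0:
--         return 0
--     elif len(A) == 1:
--         return abs(A[0])
--
--     A = [abs(i) for i in A]  # 将数组A的元素转为非负数
--     max_num = max(A)
--     sum_num = sum(A)
--     count = [0] * (max_num + 1)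
--     for i in range(len(A)):  # 统计每个元素出现的次数
--         count[A[i]] += 1
--
--     sign = [0] + [-1] * sum_num  # 存储从0到最大值中的每个值是否可以达到的标识
--
--     for h in range(1, max_num + 1):
--         if count[h] > 0:  # 说明有这个数
--             for j in range(sum_num):
--                 if sign[j] >= 0:   #
--                     sign[j] = count[h]
--                 elif j >= h and sign[j - h] > 0:  # 说明数字j也可以得到，但是之前未达到
--                     sign[j] = sign[j - h] - 1  # 从h到达j消耗了一个j-h
--
--     for i in range(sum_num // 2, -1, -1):  # 需要最接近sum_num // 2
--         if sign[i] >= 0:  # 说明i这个数可以达到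
--             return sum_num - 2 * i
-- ===== SOURCE B (Python) =====
-- def solution(A):
--     if len(A) == 0:
--         return 0
--     elif len(A) == 1:
--         return abs(A[0])
--     vals = [abs(x) for x in A]
--     s = sum(vals)
--     reach = {0}
--     for a in vals:
--         reach |= {r + a for r in reach}
--     for i in range(s // 2, -1, -1):
--         if i in reach:
--             return s - 2 * i
-- ===== Notes on version B (the rewrite author's own statement) =====
-- stated objective: simpler
-- what changed: A's value-indexed bounded-knapsack DP (count array plus an in-place sign array with remaining-use counters, looped over values 1..max) is replaced by plain subset-sum reachability: fold the absolute values over a set of reachable sums, then scan down from sum//2 for the first reachable sum.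
import Mathlib
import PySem

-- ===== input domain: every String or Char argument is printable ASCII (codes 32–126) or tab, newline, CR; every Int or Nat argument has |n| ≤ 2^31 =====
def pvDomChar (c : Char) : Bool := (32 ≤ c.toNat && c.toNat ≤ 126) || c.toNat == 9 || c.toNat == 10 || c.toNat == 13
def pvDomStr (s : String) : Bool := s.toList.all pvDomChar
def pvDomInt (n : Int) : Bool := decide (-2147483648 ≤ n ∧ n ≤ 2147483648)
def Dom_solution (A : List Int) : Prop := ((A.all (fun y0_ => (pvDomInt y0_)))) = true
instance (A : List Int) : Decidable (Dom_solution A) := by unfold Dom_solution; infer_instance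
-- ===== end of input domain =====

-- B replaces A's count-keyed knapsack DP by plain subset-sum reachability over a set of sums (objective: simpler).
-- Both programs are pure (the Python `A = [abs(i) for i in A]` rebinds the local name only; no caller-visible mutation).

-- ===== PORT A =====
-- `count[A[i]] += 1` (index always in range: 0 ≤ A[i] ≤ max_num)
def countStep (B2 : List Int) (c : List Int) (i : Int) : List Int :=
  PySem.List.pySetD c (PySem.List.pyGetD B2 i 0)
    (PySem.List.pyGetD c (PySem.List.pyGetD B2 i 0) 0 + 1)

-- body of `for j in range(sum_num)` (all reads/writes in range; the `j ≥ h ∧ sign[j-h] > 0`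
-- conjunction matches Python's short-circuit `and` because the branch is only taken when h ≤ j)
def innerStep (count : List Int) (h : Int) (sg : List Int) (j : Int) : List Int :=
  if 0 ≤ PySem.List.pyGetD sg j 0 then
    PySem.List.pySetD sg j (PySem.List.pyGetD count h 0)
  else if h ≤ j ∧ 0 < PySem.List.pyGetD sg (j - h) 0 then
    PySem.List.pySetD sg j (PySem.List.pyGetD sg (j - h) 0 - 1)
  else sg

-- body of `for h in range(1, max_num + 1)`
def outerStep (count : List Int) (sum_num : Int) (sg : List Int) (h : Int) : List Int :=
  if 0 < PySem.List.pyGetD count h 0 then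
    (PySem.List.pyRange 0 sum_num 1).foldl (innerStep count h) sg
  else sg

def solution (A : List Int) : Int :=
  if A.length = 0 then (0 : Int)
  else if A.length = 1 then ((PySem.List.pyGetD A 0 0).natAbs : Int)
  else
    let B2 : List Int := A.map (fun x => ((x.natAbs : Int)))
    let max_num : Int := (PySem.List.max? B2 (fun x => x)).getD 0  -- B2 ≠ [], so max? is `some`
    let sum_num : Int := B2.foldl (fun acc x => acc + x) 0
    let count : List Int :=
      (PySem.List.pyRange 0 (A.length : Int) 1).foldl (countStep B2)
        (List.replicate (max_num + 1).toNat 0)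
    let sign : List Int :=
      (PySem.List.pyRange 1 (max_num + 1) 1).foldl (outerStep count sum_num)
        ((0 : Int) :: List.replicate sum_num.toNat (-1))
    -- final scan always hits (sign[0] ≥ 0), so the `.getD 0` default is never used
    ((PySem.List.pyRange (PySem.Int.floordiv sum_num 2) (-1) (-1)).foldl
      (fun acc i =>
        match acc with
        | some r => some r
        | none => if 0 ≤ PySem.List.pyGetD sign i 0 then some (sum_num - 2 * i) else none)
      none).getD 0

-- ===== PORT B =====
-- `reach |= {r + a for r in reach}` (only membership in the set is ever used)
def reachStep (S : PySem.Set Int) (a : Int) : PySem.Set Int :=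
  PySem.Set.update S (S.map (fun r => r + a))

def solution_alt (A : List Int) : Int :=
  if A.length = 0 then (0 : Int)
  else if A.length = 1 then ((PySem.List.pyGetD A 0 0).natAbs : Int)
  else
    let B2 : List Int := A.map (fun x => ((x.natAbs : Int)))
    let sum_num : Int := B2.foldl (fun acc x => acc + x) 0
    let reach : PySem.Set Int := B2.foldl reachStep (PySem.Set.ofList [0])
    -- scan always hits (0 ∈ reach), so the `.getD 0` default is never used
    ((PySem.List.pyRange (PySem.Int.floordiv sum_num 2) (-1) (-1)).foldl
      (fun acc i =>
        match acc with
        | some r => some r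
        | none => if PySem.Set.contains reach i then some (sum_num - 2 * i) else none)
      none).getD 0

-- ===== PRECONDITION & SPEC =====
def Spec_solution (A : List Int) (out : Int) : Prop := out = solution_alt A
instance (A : List Int) (out : Int) : Decidable (Spec_solution A out) := by unfold Spec_solution; infer_instance

-- ===== CLAIM (what is proved, stated in full; the proofs are below) =====
def Claim_equal_solution : Prop := ∀ (A : List Int), Dom_solution A → Spec_solution A (solution A)

-- ===== LEMMAS AND PROOFS =====

-- subset sums of a list of naturals
def sums : List Nat → Nat → Prop
  | [], n => n = 0
  | a :: l, n => sums l n ∨ (a ≤ n ∧ sums l (n - a))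

-- casting a list of naturals to integers
def castList (l : List Nat) : List Int := l.map (fun n : Nat => (n : Int))

-- subset sums over the integers (what B's fold computes)
def sumsZ : List Int → Int → Prop
  | [], x => x = 0
  | a :: l, x => sumsZ l x ∨ sumsZ l (x - a)

-- reachable using only the values 1..h, value v at most (c v) times (what A's DP computes)
def Rh (c : Nat → Nat) : Nat → Nat → Prop
  | 0, j => j = 0
  | h + 1, j => ∃ k, k ≤ c (h + 1) ∧ k * (h + 1) ≤ j ∧ Rh c h (j - k * (h + 1))

-- grouped list: c 1 copies of 1, …, c h copies of h
def grouped (c : Nat → Nat) : Nat → List Nat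
  | 0 => []
  | h + 1 => grouped c h ++ List.replicate (c (h + 1)) (h + 1)

-- least number of copies of h needed on top of f-reachability
def pP (f : Nat → Int) (h j : Nat) (k : Nat) : Prop := k * h ≤ j ∧ 0 ≤ f (j - k * h)

def bestK (f : Nat → Int) (h : Nat) : Nat → Option Nat
  | j =>
    if 0 ≤ f j then some 0
    else if hj : 1 ≤ h ∧ h ≤ j then (bestK f h (j - h)).map (· + 1)
    else none
  termination_by j => j
  decreasing_by omega

-- value of sign[j] after one full innerV pass with value h (h ≥ 1) and count c
def innerV (f : Nat → Int) (h : Nat) (c : Int) : Nat → Int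
  | j =>
    if 0 ≤ f j then c
    else if hj : 1 ≤ h ∧ h ≤ j then
      (if 0 < innerV f h c (j - h) then innerV f h c (j - h) - 1 else f j)
    else f j
  termination_by j => j
  decreasing_by all_goals omega

lemma sums_swap_aux (a b : Nat) (l : List Nat) (n : Nat) :
    sums (a :: b :: l) n → sums (b :: a :: l) n := by
  simp only [sums]
  rintro ((h | ⟨hb, h⟩) | ⟨ha, (h | ⟨hb, h⟩)⟩)
  · exact Or.inl (Or.inl h)
  · exact Or.inr ⟨hb, Or.inl h⟩
  · exact Or.inl (Or.inr ⟨ha, h⟩)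
  · exact Or.inr ⟨by omega, Or.inr ⟨by omega, by rwa [show n - b - a = n - a - b by omega]⟩⟩

lemma sums_perm {l l' : List Nat} (p : l.Perm l') : ∀ n, sums l n ↔ sums l' n := by
  induction p with
  | nil => intro n; rfl
  | cons a _ ih => intro n; simp only [sums, ih]
  | swap a b l => exact fun n => ⟨sums_swap_aux _ _ _ n, sums_swap_aux _ _ _ n⟩
  | trans _ _ ih1 ih2 => intro n; rw [ih1, ih2]

lemma sums_append (l1 l2 : List Nat) (n : Nat) :
    sums (l1 ++ l2) n ↔ ∃ a b, sums l1 a ∧ sums l2 b ∧ n = a + b := by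
  induction l1 generalizing n with
  | nil =>
      simp only [List.nil_append, sums]
      constructor
      · exact fun h => ⟨0, n, rfl, h, by omega⟩
      · rintro ⟨a, b, rfl, h, rfl⟩; simpa using h
  | cons x l1 ih =>
      simp only [List.cons_append, sums, ih]
      constructor
      · rintro (⟨a, b, h1, h2, rfl⟩ | ⟨hx, a, b, h1, h2, hn⟩)
        · exact ⟨a, b, Or.inl h1, h2, rfl⟩
        · exact ⟨a + x, b, Or.inr ⟨by omega, by simpa [Nat.add_sub_cancel] using h1⟩, h2, by omega⟩
      · rintro ⟨a, b, h1 | ⟨hx, h1⟩, h2, rfl⟩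
        · exact Or.inl ⟨a, b, h1, h2, rfl⟩
        · exact Or.inr ⟨by omega, a - x, b, h1, h2, by omega⟩

lemma sums_replicate (k v n : Nat) :
    sums (List.replicate k v) n ↔ ∃ t, t ≤ k ∧ n = t * v := by
  induction k generalizing n with
  | zero => simp [List.replicate, sums]
  | succ k ih =>
      simp only [List.replicate_succ, sums, ih]
      constructor
      · rintro (⟨t, ht, rfl⟩ | ⟨hv, t, ht, hn⟩)
        · exact ⟨t, by omega, rfl⟩
        · exact ⟨t + 1, by omega, by rw [Nat.succ_mul]; omega⟩
      · rintro ⟨t, ht, rfl⟩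
        rcases Nat.eq_or_lt_of_le ht with h | h
        · subst h
          rcases Nat.eq_zero_or_pos v with hv | hv
          · exact Or.inl ⟨k, le_refl _, by simp [hv]⟩
          · refine Or.inr ⟨by rw [Nat.succ_mul]; omega, k, le_refl _, by rw [Nat.succ_mul]; omega⟩
        · exact Or.inl ⟨t, by omega, rfl⟩

lemma sums_grouped (c : Nat → Nat) (h j : Nat) : sums (grouped c h) j ↔ Rh c h j := by
  induction h generalizing j with
  | zero => simp [grouped, sums, Rh]
  | succ h ih =>
      simp only [grouped, Rh, sums_append, sums_replicate, ih]
      constructor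
      · rintro ⟨a, b, h1, ⟨t, ht, rfl⟩, rfl⟩
        exact ⟨t, ht, by omega, by rw [Nat.add_sub_cancel]; exact h1⟩
      · rintro ⟨k, hk, hkj, h1⟩
        exact ⟨j - k * (h + 1), k * (h + 1), h1, ⟨k, hk, rfl⟩, by omega⟩

lemma count_grouped (c : Nat → Nat) (h v : Nat) :
    (grouped c h).count v = if 1 ≤ v ∧ v ≤ h then c v else 0 := by
  induction h with
  | zero =>
      simp only [grouped, List.count_nil]
      split_ifs with h1
      · omega
      · rfl
  | succ h ih =>
      simp only [grouped, List.count_append, ih, List.count_replicate, beq_iff_eq]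
      by_cases hv : v = h + 1
      · subst hv; split_ifs <;> omega
      · split_ifs <;> omega

lemma sums_filter_ne_zero (l : List Nat) (n : Nat) :
    sums l n ↔ sums (l.filter (fun x => x ≠ 0)) n := by
  induction l generalizing n with
  | nil => rfl
  | cons a l ih =>
      by_cases ha : a = 0
      · subst ha
        simp only [sums, List.filter_cons, show (decide ((0 : Nat) ≠ 0)) = false by simp,
          Bool.false_eq_true, if_false, Nat.sub_zero, Nat.zero_le, true_and, or_self]
        exact ih n
      · simp only [sums, List.filter_cons, show (decide (a ≠ 0)) = true by simp [ha], if_true,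
          ih]

lemma reach_mem (l : List Int) (S : PySem.Set Int) (x : Int) :
    x ∈ l.foldl reachStep S ↔ ∃ r ∈ S, sumsZ l (x - r) := by
  induction l generalizing S with
  | nil =>
      simp only [List.foldl_nil, sumsZ]
      constructor
      · exact fun h => ⟨x, h, by omega⟩
      · rintro ⟨r, hr, h⟩
        have : x = r := by omega
        rwa [this]
  | cons a l ih =>
      simp only [List.foldl_cons, ih, reachStep, sumsZ]
      constructor
      · rintro ⟨r, hr, h⟩
        rw [PySem.Set.mem_update] at hr
        rcases hr with hr | hr
        · exact ⟨r, hr, Or.inl h⟩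
        · rcases List.mem_map.mp hr with ⟨r0, hr0, rfl⟩
          refine ⟨r0, hr0, Or.inr ?_⟩
          have : x - r0 - a = x - (r0 + a) := by omega
          rwa [this]
      · rintro ⟨r, hr, h | h⟩
        · exact ⟨r, by rw [PySem.Set.mem_update]; exact Or.inl hr, h⟩
        · refine ⟨r + a, by rw [PySem.Set.mem_update]; exact Or.inr (List.mem_map.mpr ⟨r, hr, rfl⟩), ?_⟩
          have : x - (r + a) = x - r - a := by omega
          rwa [this]

lemma sumsZ_cast (l : List Nat) (x : Int) :
    sumsZ (castList l) x ↔ ∃ n : Nat, sums l n ∧ x = (n : Int) := by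
  induction l generalizing x with
  | nil =>
      constructor
      · intro hz
        have hx : x = 0 := hz
        exact ⟨0, rfl, by simp [hx]⟩
      · rintro ⟨n, hn, he⟩
        have hn0 : n = 0 := hn
        show x = 0
        rw [he, hn0]
        simp
  | cons a l ih =>
      simp only [castList] at ih
      simp only [castList, List.map_cons, sumsZ, sums, ih]
      constructor
      · rintro (⟨n, hn, rfl⟩ | ⟨n, hn, he⟩)
        · exact ⟨n, Or.inl hn, rfl⟩
        · refine ⟨n + a, Or.inr ⟨by omega, by simpa [Nat.add_sub_cancel] using hn⟩, by push_cast; omega⟩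
      · rintro ⟨n, hn | ⟨ha, hn⟩, rfl⟩
        · exact Or.inl ⟨n, hn, rfl⟩
        · exact Or.inr ⟨n - a, hn, by push_cast [ha]; omega⟩

lemma pP_shift {f : Nat → Int} {h j : Nat} (hj : h ≤ j) (k : Nat) :
    pP f h j (k + 1) ↔ pP f h (j - h) k := by
  unfold pP
  have hm : (k + 1) * h = k * h + h := by ring
  constructor
  · rintro ⟨h1, h2⟩
    refine ⟨by omega, ?_⟩
    rwa [show j - h - k * h = j - (k + 1) * h by omega]
  · rintro ⟨h1, h2⟩
    refine ⟨by omega, ?_⟩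
    rwa [show j - (k + 1) * h = j - h - k * h by omega]

lemma pP_zero_iff {f : Nat → Int} {h j : Nat} : pP f h j 0 ↔ 0 ≤ f j := by
  unfold pP; simp

lemma bestK_some (f : Nat → Int) (h : Nat) (hh : 1 ≤ h) (j m : Nat)
    (hm : bestK f h j = some m) : pP f h j m ∧ ∀ i, pP f h j i → m ≤ i := by
  induction j using Nat.strong_induction_on generalizing m with
  | _ j IH =>
      rw [bestK] at hm
      by_cases h1 : 0 ≤ f j
      · rw [if_pos h1] at hm
        cases hm
        exact ⟨pP_zero_iff.mpr h1, fun i _ => Nat.zero_le i⟩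
      · rw [if_neg h1] at hm
        by_cases h2 : 1 ≤ h ∧ h ≤ j
        · rw [dif_pos h2] at hm
          rcases Option.map_eq_some_iff.mp hm with ⟨m', hm', rfl⟩
          obtain ⟨hp', hmin'⟩ := IH (j - h) (by omega) m' hm'
          refine ⟨(pP_shift h2.2 m').mpr hp', ?_⟩
          intro i hi
          match i with
          | 0 => exact absurd (pP_zero_iff.mp hi) h1
          | i + 1 => exact Nat.succ_le_succ (hmin' i ((pP_shift h2.2 i).mp hi))
        · rw [dif_neg h2] at hm
          cases hm

lemma bestK_none (f : Nat → Int) (h : Nat) (hh : 1 ≤ h) (j : Nat)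
    (hn : bestK f h j = none) : ∀ k, ¬ pP f h j k := by
  induction j using Nat.strong_induction_on with
  | _ j IH =>
      rw [bestK] at hn
      by_cases h1 : 0 ≤ f j
      · rw [if_pos h1] at hn; cases hn
      · rw [if_neg h1] at hn
        by_cases h2 : 1 ≤ h ∧ h ≤ j
        · rw [dif_pos h2] at hn
          have hn' := Option.map_eq_none_iff.mp hn
          intro k hk
          match k with
          | 0 => exact h1 (pP_zero_iff.mp hk)
          | k + 1 => exact IH (j - h) (by omega) hn' k ((pP_shift h2.2 k).mp hk)
        · intro k hk
          match k with
          | 0 => exact h1 (pP_zero_iff.mp hk)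
          | k + 1 =>
              obtain ⟨h3, _⟩ := hk
              have hmul : (k + 1) * h = k * h + h := by ring
              omega

lemma innerV_eq (f : Nat → Int) (h : Nat) (c : Int) (hh : 1 ≤ h) (hc : 0 < c) (j : Nat) :
    innerV f h c j =
      match bestK f h j with
      | some m => if (m : Int) ≤ c then c - (m : Int) else f j
      | none => f j := by
  induction j using Nat.strong_induction_on with
  | _ j IH =>
      by_cases h1 : 0 ≤ f j
      · have hb : bestK f h j = some 0 := by rw [bestK, if_pos h1]
        rw [innerV, if_pos h1, hb]
        simp [hc.le]
      · by_cases h2 : 1 ≤ h ∧ h ≤ j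
        · have hb : bestK f h j = (bestK f h (j - h)).map (· + 1) := by
            rw [bestK, if_neg h1, dif_pos h2]
          rw [innerV, if_neg h1, dif_pos h2, hb, IH (j - h) (by omega)]
          rcases hK : bestK f h (j - h) with _ | m'
          all_goals simp only [Option.map_none, Option.map_some]
          · have hneg : ¬ 0 < f (j - h) := fun hpos =>
              bestK_none f h hh (j - h) hK 0 (pP_zero_iff.mpr hpos.le)
            rw [if_neg hneg]
          · by_cases hlt : (m' : Int) < c
            · simp only [if_pos hlt.le]
              push_cast
              split_ifs <;> linarith
            · by_cases hle : (m' : Int) ≤ c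
              · simp only [if_pos hle]
                push_cast
                split_ifs <;> linarith
              · have hfneg : ¬ 0 < f (j - h) := by
                  intro hpos
                  have h0 := (bestK_some f h hh (j - h) m' hK).2 0 (pP_zero_iff.mpr hpos.le)
                  have : (m' : Int) ≤ 0 := by exact_mod_cast h0
                  omega
                simp only [if_neg hle]
                push_cast
                split_ifs <;> linarith
        · have hb : bestK f h j = none := by rw [bestK, if_neg h1, dif_neg h2]
          rw [innerV, if_neg h1, dif_neg h2, hb]

lemma innerV_nonneg (f : Nat → Int) (h : Nat) (c : Int) (hh : 1 ≤ h) (hc : 0 < c) (j : Nat) :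
    0 ≤ innerV f h c j ↔ ∃ k : Nat, (k : Int) ≤ c ∧ k * h ≤ j ∧ 0 ≤ f (j - k * h) := by
  rw [innerV_eq f h c hh hc j]
  rcases hK : bestK f h j with _ | m
  all_goals dsimp only
  · have hnone := bestK_none f h hh j hK
    constructor
    · intro h0
      exact absurd (pP_zero_iff.mpr h0) (hnone 0)
    · rintro ⟨k, _, hk1, hk2⟩
      exact absurd ⟨hk1, hk2⟩ (hnone k)
  · obtain ⟨⟨hm1, hm2⟩, hmin⟩ := bestK_some f h hh j m hK
    by_cases hle : (m : Int) ≤ c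
    · rw [if_pos hle]
      exact ⟨fun _ => ⟨m, hle, hm1, hm2⟩, fun _ => by omega⟩
    · rw [if_neg hle]
      constructor
      · intro h0
        have := hmin 0 (pP_zero_iff.mpr h0)
        have : (m : Int) ≤ 0 := by exact_mod_cast this
        omega
      · rintro ⟨k, hk0, hk1, hk2⟩
        have := hmin k ⟨hk1, hk2⟩
        have : (m : Int) ≤ (k : Int) := by exact_mod_cast this
        omega

lemma getD_set (C : List Int) (n : Nat) (x : Int) (m : Nat) :
    (C.set n x).getD m 0 = if m = n ∧ n < C.length then x else C.getD m 0 := by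
  simp only [List.getD, List.getElem?_set]
  split_ifs with h1 h2 h3 h4 <;> simp_all

lemma innerStep_spec (count : List Int) (h : Nat) (hh : 1 ≤ h) (s : Nat) (sg G : List Int)
    (t : Nat) (ht : t ≤ s) (hGlen : G.length = s + 1)
    (hG : ∀ j : Nat, j ≤ s → G.getD j 0 =
      if j < t then innerV (fun i => sg.getD i 0) h (PySem.List.pyGetD count ((h : Nat) : Int) 0) j
      else sg.getD j 0) :
    (innerStep count ((h : Nat) : Int) G ((t : Nat) : Int)).length = s + 1 ∧
    ∀ j : Nat, j ≤ s → (innerStep count ((h : Nat) : Int) G ((t : Nat) : Int)).getD j 0 =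
      if j < t + 1 then innerV (fun i => sg.getD i 0) h (PySem.List.pyGetD count ((h : Nat) : Int) 0) j
      else sg.getD j 0 := by
  set f : Nat → Int := fun i => sg.getD i 0 with hf
  set c : Int := PySem.List.pyGetD count ((h : Nat) : Int) 0 with hc
  have hGt : G.getD t 0 = f t := by rw [hG t ht, if_neg (lt_irrefl t)]
  have hstep : ∀ j : Nat, j ≤ s → ∀ v : Int, (G.set t v).getD j 0 =
      if j = t then v else G.getD j 0 := by
    intro j hj v
    rw [getD_set]
    split_ifs with h1 h2 h3 <;> first | rfl | omega
  unfold innerStep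
  rw [PySem.List.pyGetD_natCast, hGt]
  by_cases h1 : 0 ≤ f t
  · rw [if_pos h1, PySem.List.pySetD_natCast]
    refine ⟨by rw [List.length_set, hGlen], ?_⟩
    intro j hj
    rw [hstep j hj]
    by_cases hjt : j = t
    · subst hjt
      rw [if_pos rfl, if_pos (Nat.lt_succ_self _)]
      conv_rhs => rw [innerV]
      rw [if_pos h1]
    · rw [if_neg hjt, hG j hj]
      by_cases hlt : j < t
      · rw [if_pos hlt, if_pos (by omega)]
      · rw [if_neg hlt, if_neg (by omega)]
  · rw [if_neg h1]
    by_cases hht : h ≤ t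
    · have hcast : ((t : Nat) : Int) - ((h : Nat) : Int) = (((t - h : Nat)) : Int) := by
        push_cast [hht]; ring
      have hth : t - h < t := by omega
      have hGth : PySem.List.pyGetD G (((t : Nat) : Int) - ((h : Nat) : Int)) 0 = innerV f h c (t - h) := by
        rw [hcast, PySem.List.pyGetD_natCast, hG (t - h) (by omega), if_pos hth]
      by_cases hpos : 0 < innerV f h c (t - h)
      · rw [if_pos ⟨by exact_mod_cast hht, by rw [hGth]; exact hpos⟩, hGth,
          PySem.List.pySetD_natCast]
        refine ⟨by rw [List.length_set, hGlen], ?_⟩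
        intro j hj
        rw [hstep j hj]
        by_cases hjt : j = t
        · subst hjt
          rw [if_pos rfl, if_pos (Nat.lt_succ_self _)]
          conv_rhs => rw [innerV]
          rw [if_neg h1, dif_pos ⟨hh, hht⟩, if_pos hpos]
        · rw [if_neg hjt, hG j hj]
          by_cases hlt : j < t
          · rw [if_pos hlt, if_pos (by omega)]
          · rw [if_neg hlt, if_neg (by omega)]
      · rw [if_neg (by rw [hGth]; rintro ⟨_, hx⟩; exact hpos hx)]
        refine ⟨hGlen, ?_⟩
        intro j hj
        rw [hG j hj]
        by_cases hjt : j = t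
        · subst hjt
          rw [if_neg (lt_irrefl j), if_pos (Nat.lt_succ_self _)]
          conv_rhs => rw [innerV]
          rw [if_neg h1, dif_pos ⟨hh, hht⟩, if_neg hpos]
        · by_cases hlt : j < t
          · rw [if_pos hlt, if_pos (by omega)]
          · rw [if_neg hlt, if_neg (by omega)]
    · rw [if_neg (by rintro ⟨hx, _⟩; exact hht (by exact_mod_cast hx))]
      refine ⟨hGlen, ?_⟩
      intro j hj
      rw [hG j hj]
      by_cases hjt : j = t
      · subst hjt
        rw [if_neg (lt_irrefl j), if_pos (Nat.lt_succ_self _)]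
        conv_rhs => rw [innerV]
        rw [if_neg h1, dif_neg (by rintro ⟨_, hx⟩; exact hht hx)]
      · by_cases hlt : j < t
        · rw [if_pos hlt, if_pos (by omega)]
        · rw [if_neg hlt, if_neg (by omega)]

lemma innerV_fold_aux (count sg : List Int) (s h : Nat) (hh : 1 ≤ h) (hlen : sg.length = s + 1)
    (t : Nat) (ht : t ≤ s) :
    ((PySem.List.pyRange 0 (t : Int) 1).foldl (innerStep count ((h : Nat) : Int)) sg).length = s + 1 ∧
    ∀ j : Nat, j ≤ s →
      ((PySem.List.pyRange 0 (t : Int) 1).foldl (innerStep count ((h : Nat) : Int)) sg).getD j 0 =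
        if j < t then innerV (fun i => sg.getD i 0) h (PySem.List.pyGetD count ((h : Nat) : Int) 0) j
        else sg.getD j 0 := by
  induction t with
  | zero =>
      rw [show ((0 : Nat) : Int) = 0 by rfl, PySem.List.pyRange_one_eq_nil (by omega)]
      exact ⟨by simpa using hlen, fun j hj => by simp⟩
  | succ t iht =>
      obtain ⟨ihlen, ihget⟩ := iht (by omega)
      have hsplit : PySem.List.pyRange 0 (((t + 1 : Nat)) : Int) 1 =
          PySem.List.pyRange 0 ((t : Nat) : Int) 1 ++ [((t : Nat) : Int)] := by
        push_cast
        exact PySem.List.pyRange_one_succ_right (by positivity)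
      rw [hsplit, List.foldl_append, List.foldl_cons, List.foldl_nil]
      exact innerStep_spec count h hh s sg _ t (by omega) ihlen ihget

lemma cnt_fold (M : Nat) (lN : List Nat) (C : List Int) (hlen : C.length = M + 1)
    (hmem : ∀ x ∈ lN, x ≤ M) (v : Nat) (hv : v ≤ M) :
    ((castList lN).foldl
        (fun cc w => PySem.List.pySetD cc w (PySem.List.pyGetD cc w 0 + 1)) C).getD v 0 =
      C.getD v 0 + lN.count v := by
  induction lN generalizing C with
  | nil => simp [castList]
  | cons a l ih =>
      have ha : a ≤ M := hmem a List.mem_cons_self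
      simp only [castList] at ih
      simp only [castList, List.map_cons, List.foldl_cons, PySem.List.pyGetD_natCast,
        PySem.List.pySetD_natCast]
      rw [ih (C.set a (C.getD a 0 + 1)) (by rw [List.length_set, hlen])
        (fun x hx => hmem x (List.mem_cons_of_mem _ hx)), getD_set, List.count_cons]
      by_cases hva : v = a
      · subst hva
        rw [if_pos ⟨rfl, by omega⟩]
        simp only [BEq.rfl, if_true]
        push_cast
        ring
      · rw [if_neg (by rintro ⟨h', _⟩; exact hva h'),
          beq_eq_false_iff_ne.mpr (fun h => hva h.symm)]
        push_cast
        ring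

-- the invariant carried around A's outer loop (named SInv: Inv exists in Mathlib)
def SInv (s : Nat) (c : Nat → Nat) (h : Nat) (sg : List Int) : Prop :=
  sg.length = s + 1 ∧ ∀ j : Nat, (j = 0 ∨ j < s) → (0 ≤ sg.getD j 0 ↔ Rh c h j)

lemma outer_fold (count : List Int) (s M : Nat) (c : Nat → Nat)
    (hcount : ∀ v : Nat, v ≤ M → count.getD v 0 = (c v : Int))
    (t : Nat) (ht : t ≤ M) :
    SInv s c t ((PySem.List.pyRange 1 ((t : Int) + 1) 1).foldl (outerStep count (s : Int))
      ((0 : Int) :: List.replicate s (-1))) := by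
  induction t with
  | zero =>
      rw [show ((0 : Nat) : Int) + 1 = 1 by rfl, PySem.List.pyRange_one_eq_nil (by omega)]
      simp only [List.foldl_nil]
      refine ⟨by simp, ?_⟩
      intro j hj
      match j with
      | 0 => simp [Rh]
      | j + 1 =>
          have hjs : j < s := by omega
          rw [List.getD_cons_succ]
          have : (List.replicate s (-1 : Int)).getD j 0 = -1 := by
            rw [List.getD_eq_getElem _ _ (by simpa using hjs)]
            simp
          rw [this]
          simp only [Rh]
          constructor
          · intro h0; omega
          · intro h0; omega
  | succ t ih =>
      have ih' := ih (by omega)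
      have hsplit : PySem.List.pyRange 1 (((t + 1 : Nat) : Int) + 1) 1 =
          PySem.List.pyRange 1 ((t : Int) + 1) 1 ++ [((t : Int) + 1)] := by
        push_cast
        exact PySem.List.pyRange_one_succ_right (by omega)
      rw [hsplit, List.foldl_append, List.foldl_cons, List.foldl_nil]
      set G := (PySem.List.pyRange 1 ((t : Int) + 1) 1).foldl (outerStep count (s : Int))
        ((0 : Int) :: List.replicate s (-1)) with hG
      obtain ⟨hGlen, hGget⟩ := ih'
      have hcast : ((t : Int) + 1) = (((t + 1 : Nat)) : Int) := by push_cast; ring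
      rw [hcast]
      unfold outerStep
      have hcv : PySem.List.pyGetD count (((t + 1 : Nat)) : Int) 0 = ((c (t + 1) : Nat) : Int) := by
        rw [PySem.List.pyGetD_natCast, hcount (t + 1) ht]
      simp only [hcv]
      by_cases hc0 : 0 < c (t + 1)
      · rw [if_pos (by exact_mod_cast hc0)]
        obtain ⟨hFlen, hFget⟩ := innerV_fold_aux count G s (t + 1) (by omega) hGlen s (le_refl s)
        rw [hcv] at hFget
        refine ⟨hFlen, ?_⟩
        intro j hj
        rcases Nat.lt_or_ge j s with hjs | hjs
        · rw [hFget j (by omega), if_pos hjs]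
          rw [innerV_nonneg _ _ _ (by omega) (by exact_mod_cast hc0) j]
          constructor
          · rintro ⟨k, hk1, hk2, hk3⟩
            refine ⟨k, by exact_mod_cast hk1, hk2, ?_⟩
            exact (hGget (j - k * (t + 1)) (by omega)).mp hk3
          · rintro ⟨k, hk1, hk2, hk3⟩
            refine ⟨k, by exact_mod_cast hk1, hk2, (hGget (j - k * (t + 1)) (by omega)).mpr hk3⟩
        · have hj0 : j = 0 := by omega
          subst hj0
          rw [hFget 0 (by omega), if_neg (by omega)]
          rw [hGget 0 (by omega)]
          simp only [Rh]
          constructor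
          · intro h0
            exact ⟨0, by omega, by omega, by simpa⟩
          · rintro ⟨k, hk1, hk2, hk3⟩
            have hk0 : k = 0 := by
              rcases Nat.eq_zero_or_pos k with h | h
              · exact h
              · nlinarith [hk2]
            subst hk0
            simpa using hk3
      · rw [if_neg (by exact_mod_cast hc0)]
        refine ⟨hGlen, ?_⟩
        intro j hj
        rw [hGget j hj]
        have hc0' : c (t + 1) = 0 := by omega
        simp only [Rh]
        constructor
        · intro h0
          exact ⟨0, by omega, by omega, by simpa⟩
        · rintro ⟨k, hk1, hk2, hk3⟩
          have hk0 : k = 0 := by omega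
          subst hk0
          simpa using hk3

lemma foldl_add_cast (l : List Nat) (a : Int) :
    (castList l).foldl (fun acc x => acc + x) a = a + (l.sum : Int) := by
  induction l generalizing a with
  | nil => simp [castList]
  | cons x l ih =>
      simp only [castList] at ih
      simp only [castList, List.map_cons, List.foldl_cons, List.sum_cons, ih]
      push_cast; ring

lemma getD_replicate_zero (n v : Nat) : (List.replicate n (0 : Int)).getD v 0 = 0 := by
  rcases Nat.lt_or_ge v n with h | h
  · rw [List.getD_eq_getElem _ _ (by simpa using h)]; simp
  · rw [List.getD_eq_default _ _ (by simpa using h)]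

theorem solution_eq_alt (A : List Int) : solution A = solution_alt A := by
  unfold solution solution_alt
  by_cases h0 : A.length = 0
  · rw [if_pos h0, if_pos h0]
  by_cases h1 : A.length = 1
  · rw [if_neg h0, if_pos h1, if_neg h0, if_pos h1]
  rw [if_neg h0, if_neg h1, if_neg h0, if_neg h1]
  dsimp only
  have hB2 : A.map (fun x => ((Int.natAbs x : Nat) : Int)) =
      castList (A.map Int.natAbs) := by
    simp only [castList, List.map_map]
    rfl
  rw [hB2]
  set valsN : List Nat := A.map Int.natAbs with hvalsN
  have hsum : List.foldl (fun acc x => acc + x) 0 (castList valsN) =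
      ((valsN.sum : Nat) : Int) := by
    rw [foldl_add_cast]; ring
  rw [hsum]
  set s : Nat := valsN.sum with hs
  -- the maximum
  obtain ⟨mv, hmv⟩ : ∃ mv, PySem.List.max? (castList valsN) (fun x => x) = some mv := by
    rcases h : PySem.List.max? (castList valsN) (fun x => x) with _ | m
    · rw [PySem.List.max?_eq_none_iff] at h
      exfalso
      apply h0
      have := congrArg List.length h
      simpa [castList, hvalsN] using this
    · exact ⟨m, rfl⟩
  have hmvmem := PySem.List.max?_mem hmv
  have hmv0 : 0 ≤ mv := by
    simp only [castList] at hmvmem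
    rcases List.mem_map.mp hmvmem with ⟨n, _, rfl⟩
    positivity
  set M : Nat := mv.toNat with hM
  have hmax : (PySem.List.max? (castList valsN) (fun x => x)).getD 0 =
      ((M : Nat) : Int) := by
    rw [hmv, Option.getD_some, hM, Int.toNat_of_nonneg hmv0]
  rw [hmax]
  have hvle : ∀ x ∈ valsN, x ≤ M := by
    intro x hx
    have hxm : ((x : Nat) : Int) ∈ castList valsN := by
      simp only [castList]
      exact List.mem_map.mpr ⟨x, hx, rfl⟩
    have := PySem.List.max?_isMax hmv _ hxm
    simp only at this
    omega
  have htn : (((M : Nat) : Int) + 1).toNat = M + 1 := by omega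
  rw [htn]
  have hlenA : (A.length : Int) = ((castList valsN).length : Int) := by
    rw [hvalsN]
    simp [castList]
  rw [hlenA]
  rw [show countStep (castList valsN) =
      (fun acc j => (fun cc w => PySem.List.pySetD cc w (PySem.List.pyGetD cc w 0 + 1)) acc
        (PySem.List.pyGetD (castList valsN) j 0)) from rfl]
  rw [PySem.List.foldl_pyRange_zero_pyGetD' (castList valsN) 0
    (fun cc w => PySem.List.pySetD cc w (PySem.List.pyGetD cc w 0 + 1)) (List.replicate (M + 1) 0)]
  have hcountD : ∀ v : Nat, v ≤ M →
      ((castList valsN).foldl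
        (fun cc w => PySem.List.pySetD cc w (PySem.List.pyGetD cc w 0 + 1))
        (List.replicate (M + 1) 0)).getD v 0 = ((valsN.count v : Nat) : Int) := by
    intro v hv
    rw [cnt_fold M valsN _ (by simp) hvle v hv, getD_replicate_zero, zero_add]
  rw [show ((s : Nat) : Int).toNat = s from by omega]
  have hSInv := outer_fold _ s M (fun v => valsN.count v) hcountD M (le_refl M)
  -- B's reachable-set characterisation
  have hreach : ∀ j : Nat,
      (((castList valsN).foldl reachStep
        (PySem.Set.ofList [0])).contains ((j : Nat) : Int) = true) ↔ sums valsN j := by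
    intro j
    rw [PySem.Set.contains_iff, reach_mem]
    constructor
    · rintro ⟨r, hr, hz⟩
      rw [PySem.Set.mem_ofList] at hr
      rcases List.mem_singleton.mp hr with rfl
      rw [sub_zero] at hz
      rcases (sumsZ_cast valsN _).mp hz with ⟨n, hn, he⟩
      have : j = n := by exact_mod_cast he
      rwa [this]
    · intro hj
      refine ⟨0, by rw [PySem.Set.mem_ofList]; exact List.mem_singleton.mpr rfl, ?_⟩
      rw [sub_zero]
      exact (sumsZ_cast valsN _).mpr ⟨j, hj, rfl⟩
  have hperm : (valsN.filter (fun x => x ≠ 0)).Perm (grouped (fun v => valsN.count v) M) := by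
    rw [List.perm_iff_count]
    intro v
    rw [count_grouped]
    by_cases hv0 : v = 0
    · subst hv0
      rw [if_neg (by omega), List.count_eq_zero]
      intro hmem
      have hf := List.of_mem_filter hmem
      simp at hf
    · by_cases hvM : v ≤ M
      · rw [if_pos ⟨by omega, hvM⟩, List.count_filter (by simpa using hv0)]
      · rw [if_neg (by omega), List.count_eq_zero]
        intro hmem
        exact hvM (hvle v (List.mem_of_mem_filter hmem))
  -- the two final scans agree pointwise
  apply congrArg (fun o : Option Int => o.getD 0)
  apply PySem.List.foldl_congr_mem
  intro acc i hi
  cases acc with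
  | some r => rfl
  | none =>
      dsimp only
      rw [show PySem.Int.floordiv ((s : Nat) : Int) 2 = (((s / 2 : Nat)) : Int) from by
        exact_mod_cast PySem.Int.floordiv_natCast s 2] at hi
      rw [PySem.List.mem_pyRange_neg_one] at hi
      obtain ⟨hi1, hi2⟩ := hi
      have hjeq : i = ((i.toNat : Nat) : Int) := (Int.toNat_of_nonneg (by omega)).symm
      rw [hjeq, PySem.List.pyGetD_natCast]
      apply if_congr ?_ rfl rfl
      have hjcond : i.toNat = 0 ∨ i.toNat < s := by
        rcases Nat.eq_zero_or_pos s with hs0 | hs0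
        · left; omega
        · right
          have h2 : i.toNat ≤ s / 2 := by omega
          omega
      rw [hSInv.2 i.toNat hjcond, hreach i.toNat, sums_filter_ne_zero, sums_perm hperm,
        sums_grouped]

-- ===== VERDICT (by name: the statement is the Claim_ definition above) =====
theorem solution_spec : Claim_equal_solution := by
  intro A _hdom
  unfold Spec_solution
  exact solution_eq_alt A
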